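-- pv_equiv track=rewrite | github.com/Maxsafer/lexicNonRegex | main.py | couldBePartOfID
-- ===== SOURCE A (Python) =====
-- def couldBePartOfID(char):
--   if char.isdigit():
--     return True
--   else:
--     char = ord(char)
--     for x in range(ord('A'),ord('z')+1):
--       if x not in range(91, 97):
--         if char == x:
--           return True
--   return False
-- ===== SOURCE B (Python) =====
-- def couldBePartOfID(char):
--     if char.isdigit():
--         return True
--     c = ord(char)
--     return 65 <= c <= 90 or 97 <= c <= 122
-- ===== Notes on version B (the rewrite author's own statement) =====
-- stated objective: simpler
-- what changed: Replaces the 58-iteration membership scan over the character-code range (with the punctuation gap skipped per iteration) by a direct closed-form test of the two ASCII letter intervals.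
import Mathlib
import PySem

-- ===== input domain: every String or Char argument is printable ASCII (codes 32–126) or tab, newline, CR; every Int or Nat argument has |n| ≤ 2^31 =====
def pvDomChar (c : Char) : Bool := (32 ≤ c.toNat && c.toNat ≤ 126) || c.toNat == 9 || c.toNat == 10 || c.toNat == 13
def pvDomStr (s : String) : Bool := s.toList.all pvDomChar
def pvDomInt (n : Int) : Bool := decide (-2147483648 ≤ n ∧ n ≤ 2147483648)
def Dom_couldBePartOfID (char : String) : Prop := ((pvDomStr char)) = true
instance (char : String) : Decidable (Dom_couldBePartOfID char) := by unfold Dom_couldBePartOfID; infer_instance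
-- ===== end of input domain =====

-- B replaces the constant 58-iteration membership scan with a closed-form ASCII range check (simpler).
-- ===== PORT A =====
-- for x in range(ord('A'), ord('z')+1): if x not in range(91,97): if char == x: return True
def couldBePartOfID (char : String) : Bool :=
  if PySem.Str.strIsdigit char then true
  else
    match char.toList with
    | [c] =>  -- char = ord(char); ord raises TypeError unless len == 1 (excluded by Pre_)
      (PySem.List.pyRange 65 123 1).any (fun x =>
        if ¬ (91 ≤ x ∧ x < 97) then ((c.toNat : Int) == x) else false)
    | _ => false

-- ===== PORT B =====
def couldBePartOfID_alt (char : String) : Bool :=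
  if PySem.Str.strIsdigit char then true
  else
    match char.toList with
    | [] => false  -- ord raises here as in A (excluded by Pre_)
    | c :: rest =>  -- c = ord(char); raises as in A when len != 1 (excluded by Pre_)
      if rest.isEmpty then
        decide ((65 ≤ (c.toNat : Int) ∧ (c.toNat : Int) ≤ 90) ∨
                (97 ≤ (c.toNat : Int) ∧ (c.toNat : Int) ≤ 122))
      else false

-- ===== PRECONDITION & SPEC =====
-- Pre_ excludes exactly the inputs where ord(char) raises TypeError: non-digit strings of length != 1.
def Pre_couldBePartOfID (char : String) : Prop :=
  PySem.Str.strIsdigit char = true ∨ char.length = 1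
instance (char : String) : Decidable (Pre_couldBePartOfID char) := by
  unfold Pre_couldBePartOfID; infer_instance
def pvWitness_couldBePartOfID : String := "a"

def Spec_couldBePartOfID (char : String) (out : Bool) : Prop := out = couldBePartOfID_alt char
instance (char : String) (out : Bool) : Decidable (Spec_couldBePartOfID char out) := by unfold Spec_couldBePartOfID; infer_instance

-- ===== CLAIM (what is proved, stated in full; the proofs are below) =====
def Claim_equal_couldBePartOfID : Prop := ∀ (char : String), Dom_couldBePartOfID char → Pre_couldBePartOfID char → Spec_couldBePartOfID char (couldBePartOfID char)

-- ===== LEMMAS AND PROOFS =====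

-- ===== VERDICT (by name: the statement is the Claim_ definition above) =====
-- the scan and the closed form agree on every code point in Dom
set_option maxRecDepth 8000 in
theorem loop_eq_range : ∀ n < 127,
    ((PySem.List.pyRange 65 123 1).any (fun x =>
        if ¬ (91 ≤ x ∧ x < 97) then (((n : Nat) : Int) == x) else false))
    = decide ((65 ≤ ((n : Nat) : Int) ∧ ((n : Nat) : Int) ≤ 90) ∨
              (97 ≤ ((n : Nat) : Int) ∧ ((n : Nat) : Int) ≤ 122)) := by decide

set_option maxRecDepth 8000 in
theorem couldBePartOfID_spec : Claim_equal_couldBePartOfID := by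
  intro char hdom hpre
  unfold Spec_couldBePartOfID couldBePartOfID couldBePartOfID_alt
  by_cases hd : PySem.Str.strIsdigit char = true
  · simp only [hd, if_true]
  · simp only [if_neg hd]
    have hlen : char.toList.length = 1 := by
      rcases hpre with h | h
      · exact absurd h hd
      · exact h
    obtain ⟨c, hc⟩ := List.length_eq_one_iff.mp hlen
    have hc126 : c.toNat < 127 := by
      have hd2 := hdom
      unfold Dom_couldBePartOfID pvDomStr at hd2
      rw [hc] at hd2
      simp [pvDomChar] at hd2
      omega
    simp only [hc]
    exact loop_eq_range c.toNat hc126
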